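-- pv_equiv track=rewrite | github.com/alexmaichen/aotw | aotw_board_maker.py | numberToFloat
-- ===== SOURCE A (Python) =====
-- def numberToFloat(score: str) -> tuple[int, list]:
-- 	"""
-- 	destringify an integer string, return result and annotations
-- 	"""
-- 	if not score:
-- 		return (0, [])
-- 	indices_to_remove = []
-- 	notes = []
-- 	for i in range(len(score)):
-- 		if '0' <= score[i] <= '9': pass
-- 		else:
-- 			indices_to_remove.append(i)
-- 			notes.append(score[i])
-- 	# remove notes from the number string
-- 	for i in reversed(indices_to_remove):
-- 		score = score[:i] + score[i+1:]
--
-- 	if not score: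
-- 		return (0, notes)
--
-- 	try:
-- 		return (int(score), notes)
-- 	except ValueError:
-- 		return (0, notes)
-- ===== SOURCE B (Python) =====
-- def numberToFloat(score: str) -> tuple[int, list]:
-- 	"""
-- 	destringify an integer string, return result and annotations
-- 	"""
-- 	digits = ''.join(c for c in score if '0' <= c <= '9')
-- 	notes = [c for c in score if not ('0' <= c <= '9')]
-- 	return (int(digits) if digits else 0, notes)
-- ===== Notes on version B (the rewrite author's own statement) =====
-- stated objective: faster
-- what changed: B partitions the characters once into digits and notes and calls int() once, instead of A's two phases of collecting removal indices and then rebuilding the whole string by slicing once per removed character.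
import Mathlib
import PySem

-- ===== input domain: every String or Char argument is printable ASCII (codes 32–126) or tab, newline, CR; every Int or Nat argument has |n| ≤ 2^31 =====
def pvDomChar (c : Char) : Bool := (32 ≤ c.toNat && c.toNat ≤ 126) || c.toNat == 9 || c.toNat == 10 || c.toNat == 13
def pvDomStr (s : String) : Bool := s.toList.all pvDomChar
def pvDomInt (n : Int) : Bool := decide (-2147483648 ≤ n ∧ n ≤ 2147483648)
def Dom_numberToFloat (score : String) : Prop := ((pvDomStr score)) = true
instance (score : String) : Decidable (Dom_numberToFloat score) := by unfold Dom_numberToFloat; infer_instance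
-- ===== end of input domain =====

-- B replaces A's collect-indices-then-rebuild-the-string-once-per-removed-character scheme by one
-- partition of the characters (digits vs notes) and a single int() call.

-- ===== PORT A =====
def numberToFloat (score : String) : Int × List String :=
  -- if not score: return (0, [])
  if score.toList = [] then (0, [])
  else
    -- for i in range(len(score)): if '0' <= score[i] <= '9': pass else: append i / append score[i]
    let st := (PySem.List.pyRange 0 (PySem.Str.len score) 1).foldl
      (fun (st : List Int × List String) i =>
        if decide ('0' ≤ PySem.List.pyGetD score.toList i ' ') &&
           decide (PySem.List.pyGetD score.toList i ' ' ≤ '9')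
        then st
        else (st.1 ++ [i], st.2 ++ [String.ofList [PySem.List.pyGetD score.toList i ' ']]))
      ([], [])
    -- for i in reversed(indices_to_remove): score = score[:i] + score[i+1:]
    let cs := st.1.reverse.foldl
      (fun cs i => PySem.List.slice cs none (some i) ++ PySem.List.slice cs (some (i + 1)) none)
      score.toList
    -- if not score: return (0, notes)
    if cs = [] then (0, st.2)
    else
      -- try: return (int(score), notes) except ValueError: return (0, notes)
      match PySem.Int.ofChars? cs with
      | some v => (v, st.2)
      | none => (0, st.2)

-- ===== PORT B =====
def numberToFloat_alt (score : String) : Int × List String :=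
  -- digits = ''.join(c for c in score if '0' <= c <= '9')
  let digits := score.toList.filter (fun c => decide ('0' ≤ c) && decide (c ≤ '9'))
  -- notes = [c for c in score if not ('0' <= c <= '9')]
  let notes := (score.toList.filter (fun c => !(decide ('0' ≤ c) && decide (c ≤ '9')))).map
    (fun c => String.ofList [c])
  -- return (int(digits) if digits else 0, notes); int() on a nonempty all-digit string never
  -- raises, so the none branch below is unreachable
  (if digits = [] then 0
   else
     match PySem.Int.ofChars? digits with
     | some v => v
     | none => 0, notes)

-- ===== PRECONDITION & SPEC =====
def Spec_numberToFloat (score : String) (out : Int × List String) : Prop := out = numberToFloat_alt score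
instance (score : String) (out : Int × List String) : Decidable (Spec_numberToFloat score out) := by unfold Spec_numberToFloat; infer_instance

-- ===== CLAIM (what is proved, stated in full; the proofs are below) =====
def Claim_equal_numberToFloat : Prop := ∀ (score : String), Dom_numberToFloat score → Spec_numberToFloat score (numberToFloat score)

-- ===== LEMMAS AND PROOFS =====

-- the digit test both programs use
def pvDig (c : Char) : Bool := decide ('0' ≤ c) && decide (c ≤ '9')

-- the indices A's first loop collects, as naturals
def pvBad (cs : List Char) : List Nat :=
  (List.range cs.length).filter (fun i => !pvDig (cs.getD i ' '))

-- the removal step of A's second loop, on naturals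
def pvRem (cs : List Char) (i : Nat) : List Char := cs.take i ++ cs.drop (i + 1)

theorem pvBad_cons (c : Char) (cs : List Char) :
    pvBad (c :: cs) = (if pvDig c then [] else [0]) ++ (pvBad cs).map (· + 1) := by
  unfold pvBad
  rw [List.length_cons, List.range_succ_eq_map, List.filter_cons, List.filter_map]
  cases h : pvDig c <;> simp [h, Function.comp_def, Nat.succ_eq_add_one]

theorem pvRem_foldl_shift (c : Char) (cs : List Char) (l : List Nat) :
    (l.map (· + 1)).foldl pvRem (c :: cs) = c :: l.foldl pvRem cs := by
  induction l generalizing cs with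
  | nil => rfl
  | cons a l ih =>
      simp only [List.map_cons, List.foldl_cons]
      have h : pvRem (c :: cs) (a + 1) = c :: pvRem cs a := by
        simp [pvRem, List.take_succ_cons, List.drop_succ_cons]
      rw [h, ih]

theorem pvRemoval (cs : List Char) :
    (pvBad cs).reverse.foldl pvRem cs = cs.filter pvDig := by
  induction cs with
  | nil => rfl
  | cons c cs ih =>
      rw [pvBad_cons]
      cases h : pvDig c with
      | true =>
          rw [if_pos rfl, List.nil_append, ← List.map_reverse, pvRem_foldl_shift, ih,
            List.filter_cons, if_pos h]
      | false =>
          rw [if_neg (by simp), List.singleton_append, List.reverse_cons, List.foldl_append,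
            ← List.map_reverse, pvRem_foldl_shift, ih, List.filter_cons, if_neg (by simp [h])]
          simp [pvRem]

theorem pvLoop1 (cs : List Char) (n : Nat) :
    (List.range n).foldl
      (fun (st : List Int × List String) (i : Nat) =>
        if pvDig (cs.getD i ' ') then st
        else (st.1 ++ [(i : Int)], st.2 ++ [String.ofList [cs.getD i ' ']]))
      ([], []) =
    (((List.range n).filter (fun i => !pvDig (cs.getD i ' '))).map (Nat.cast),
     ((List.range n).filter (fun i => !pvDig (cs.getD i ' '))).map
       (fun i => String.ofList [cs.getD i ' '])) := by
  induction n with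
  | zero => rfl
  | succ n ih =>
      rw [List.range_succ, List.foldl_append, List.filter_append, ih]
      cases h : pvDig (cs[n]?.getD ' ') <;> simp [h, List.getD_eq_getElem?_getD]

theorem pvNotes_eq (cs : List Char) :
    (pvBad cs).map (fun i => String.ofList [cs.getD i ' ']) =
      (cs.filter (fun c => !pvDig c)).map (fun c => String.ofList [c]) := by
  induction cs with
  | nil => rfl
  | cons c cs ih =>
      rw [pvBad_cons, List.filter_cons, List.map_append, List.map_map]
      simp only [Function.comp_def, List.getD_cons_succ]
      rw [ih]
      cases h : pvDig c
      · simp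
      · simp

-- ===== VERDICT (by name: the statement is the Claim_ definition above) =====
theorem numberToFloat_spec : Claim_equal_numberToFloat := by
  intro score _
  unfold Spec_numberToFloat numberToFloat numberToFloat_alt
  set cs := score.toList with hcs
  by_cases h : cs = []
  · simp [h]
  · rw [if_neg h]
    rw [PySem.Str.len_eq, ← hcs, PySem.List.pyRange_zero_natCast, List.foldl_map]
    have hbody :
        (fun (st : List Int × List String) (i : Nat) =>
            if decide ('0' ≤ PySem.List.pyGetD cs (↑i) ' ') &&
               decide (PySem.List.pyGetD cs (↑i) ' ' ≤ '9')
            then st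
            else (st.1 ++ [(i : Int)], st.2 ++ [String.ofList [PySem.List.pyGetD cs (↑i) ' ']])) =
          (fun (st : List Int × List String) (i : Nat) =>
            if pvDig (cs.getD i ' ') then st
            else (st.1 ++ [(i : Int)], st.2 ++ [String.ofList [cs.getD i ' ']])) := by
      funext st i
      rw [PySem.List.pyGetD_natCast]
      rfl
    rw [hbody, pvLoop1]
    have hrem :
        ((((List.range cs.length).filter (fun i => !pvDig (cs.getD i ' '))).map
            (Nat.cast (R := Int))).reverse.foldl
          (fun t (i : Int) =>
            PySem.List.slice t none (some i) ++ PySem.List.slice t (some (i + 1)) none) cs)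
          = cs.filter pvDig := by
      rw [← List.map_reverse, List.foldl_map]
      have hstep :
          (fun (t : List Char) (i : Nat) =>
              PySem.List.slice t none (some (i : Int)) ++
                PySem.List.slice t (some ((i : Int) + 1)) none) = pvRem := by
        funext t i
        have : ((i : Int) + 1) = ((i + 1 : Nat) : Int) := by push_cast; ring
        rw [this, PySem.List.slice_to_natCast, PySem.List.slice_from_natCast]
        rfl
      rw [hstep]
      exact pvRemoval cs
    simp only [hrem]
    have hnotes : ((List.range cs.length).filter (fun i => !pvDig (cs.getD i ' '))).map
        (fun i => String.ofList [cs.getD i ' ']) =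
        (cs.filter (fun c => !pvDig c)).map (fun c => String.ofList [c]) := by
      have hn := pvNotes_eq cs
      unfold pvBad at hn
      exact hn
    rw [hnotes]
    have hdig : (fun c => decide ('0' ≤ c) && decide (c ≤ '9')) = pvDig := rfl
    have hneg : (fun c => !(decide ('0' ≤ c) && decide (c ≤ '9'))) = (fun c => !pvDig c) := rfl
    rw [hdig, hneg]
    by_cases hd : cs.filter pvDig = []
    · rw [if_pos hd, if_pos hd]
    · rw [if_neg hd, if_neg hd]
      cases PySem.Int.ofChars? (cs.filter pvDig) <;> rfl
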